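-- pv_equiv track=rewrite | github.com/calelamb/doordrill | backend/app/services/grading_service.py | _opening_quality_label
-- ===== SOURCE A (Python) =====
-- OPENING_SIGNAL_LABELS = {
--     "builds_rapport": "strong opener",
--     "mentions_social_proof": "strong opener",
--     "explains_value": "neutral opener",
--     "neutral_delivery": "weak opener",
--     "pushes_close": "damaging opener",
--     "dismisses_concern": "damaging opener",
-- }
--
-- def _opening_quality_label(first_turn_signals: list[str]) -> str | None:
--     labels = [OPENING_SIGNAL_LABELS[signal] for signal in first_turn_signals if signal in OPENING_SIGNAL_LABELS]
--     if not labels: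
--         return None
--     if "damaging opener" in labels:
--         return "damaging opener"
--     if "weak opener" in labels:
--         return "weak opener"
--     if "strong opener" in labels:
--         return "strong opener"
--     return "neutral opener"
-- ===== SOURCE B (Python) =====
-- OPENING_SIGNAL_RANKS = {
--     "builds_rapport": 2,
--     "mentions_social_proof": 2,
--     "explains_value": 3,
--     "neutral_delivery": 1,
--     "pushes_close": 0,
--     "dismisses_concern": 0,
-- }
--
-- RANK_LABELS = ["damaging opener", "weak opener", "strong opener", "neutral opener"]
--
--
-- def _opening_quality_label(first_turn_signals: list[str]) -> str | None:
--     best = None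
--     for sig in first_turn_signals:
--         rank = OPENING_SIGNAL_RANKS.get(sig)
--         if rank is not None and (best is None or rank < best):
--             best = rank
--     return None if best is None else RANK_LABELS[best]
-- ===== Notes on version B (the rewrite author's own statement) =====
-- stated objective: simpler
-- what changed: Replaces the intermediate labels list plus three separate membership scans with a single running-minimum pass over priority ranks (damaging=0, weak=1, strong=2, neutral=3), converting the best rank back to its label at the end.
import Mathlib
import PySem

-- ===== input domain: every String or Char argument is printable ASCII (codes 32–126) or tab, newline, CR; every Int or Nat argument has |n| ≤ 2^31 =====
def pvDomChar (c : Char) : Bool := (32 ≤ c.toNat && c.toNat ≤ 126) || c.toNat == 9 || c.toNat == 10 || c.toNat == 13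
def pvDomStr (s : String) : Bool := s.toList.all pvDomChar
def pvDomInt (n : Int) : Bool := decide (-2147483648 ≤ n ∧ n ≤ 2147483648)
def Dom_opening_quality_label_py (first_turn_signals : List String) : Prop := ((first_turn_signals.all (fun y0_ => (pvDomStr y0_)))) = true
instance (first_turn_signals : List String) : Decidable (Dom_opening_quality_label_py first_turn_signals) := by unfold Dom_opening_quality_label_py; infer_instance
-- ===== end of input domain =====

-- B replaces A's intermediate labels list and three membership scans by one
-- running-minimum pass over priority ranks (simpler decomposition, same O(n) cost).

-- ===== PORT A =====
def pvLabelDict : PySem.Dict String String := PySem.Dict.ofList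
  [("builds_rapport", "strong opener"),
   ("mentions_social_proof", "strong opener"),
   ("explains_value", "neutral opener"),
   ("neutral_delivery", "weak opener"),
   ("pushes_close", "damaging opener"),
   ("dismisses_concern", "damaging opener")]

def opening_quality_label_py (first_turn_signals : List String) : Option String :=
  -- labels = [OPENING_SIGNAL_LABELS[s] for s in first_turn_signals if s in OPENING_SIGNAL_LABELS]
  let labels := first_turn_signals.filterMap (fun signal => pvLabelDict.get? signal)
  if labels.isEmpty then none
  else if labels.contains "damaging opener" then some "damaging opener"
  else if labels.contains "weak opener" then some "weak opener"
  else if labels.contains "strong opener" then some "strong opener"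
  else some "neutral opener"

-- ===== PORT B =====
def pvRankDict : PySem.Dict String Int := PySem.Dict.ofList
  [("builds_rapport", 2),
   ("mentions_social_proof", 2),
   ("explains_value", 3),
   ("neutral_delivery", 1),
   ("pushes_close", 0),
   ("dismisses_concern", 0)]

def pvRankLabels : List String := ["damaging opener", "weak opener", "strong opener", "neutral opener"]

def opening_quality_label_py_alt (first_turn_signals : List String) : Option String :=
  let best := first_turn_signals.foldl
    (fun best signal =>
      match pvRankDict.get? signal with
      | none => best
      | some rank =>
        match best with
        | none => some rank
        | some b => if rank < b then some rank else some b)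
    none
  match best with
  | none => none
  | some b => PySem.List.pyGet? pvRankLabels b

-- ===== PRECONDITION & SPEC =====
def Spec_opening_quality_label_py (first_turn_signals : List String) (out : Option String) : Prop := out = opening_quality_label_py_alt first_turn_signals
instance (first_turn_signals : List String) (out : Option String) : Decidable (Spec_opening_quality_label_py first_turn_signals out) := by unfold Spec_opening_quality_label_py; infer_instance

-- ===== CLAIM (what is proved, stated in full; the proofs are below) =====
def Claim_equal_opening_quality_label_py : Prop := ∀ (first_turn_signals : List String), Dom_opening_quality_label_py first_turn_signals → Spec_opening_quality_label_py first_turn_signals (opening_quality_label_py first_turn_signals)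

-- ===== LEMMAS AND PROOFS =====

-- rank of each of the four label strings
def pvLr (l : String) : Int :=
  if l = "damaging opener" then 0
  else if l = "weak opener" then 1
  else if l = "strong opener" then 2
  else 3

-- the rank dict is exactly the label dict followed by pvLr
theorem pv_dict_agree (s : String) :
    pvRankDict.get? s = (pvLabelDict.get? s).map pvLr := by
  rw [(by decide : pvLabelDict = PySem.Dict.mk
    [("builds_rapport", "strong opener"), ("mentions_social_proof", "strong opener"),
     ("explains_value", "neutral opener"), ("neutral_delivery", "weak opener"),
     ("pushes_close", "damaging opener"), ("dismisses_concern", "damaging opener")]),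
     (by decide : pvRankDict = PySem.Dict.mk
    [("builds_rapport", 2), ("mentions_social_proof", 2), ("explains_value", 3),
     ("neutral_delivery", 1), ("pushes_close", 0), ("dismisses_concern", 0)])]
  by_cases h1 : s = "builds_rapport"; · subst h1; decide
  by_cases h2 : s = "mentions_social_proof"; · subst h2; decide
  by_cases h3 : s = "explains_value"; · subst h3; decide
  by_cases h4 : s = "neutral_delivery"; · subst h4; decide
  by_cases h5 : s = "pushes_close"; · subst h5; decide
  by_cases h6 : s = "dismisses_concern"; · subst h6; decide
  simp [PySem.Dict.get?, Ne.symm h1, Ne.symm h2, Ne.symm h3,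
    Ne.symm h4, Ne.symm h5, Ne.symm h6]

theorem pv_label_mem (s v : String) (h : pvLabelDict.get? s = some v) :
    v = "damaging opener" ∨ v = "weak opener" ∨ v = "strong opener" ∨ v = "neutral opener" := by
  by_cases h1 : s = "builds_rapport"
  · rw [h1, (by decide : pvLabelDict.get? "builds_rapport" = some "strong opener")] at h
    injection h with h; subst h; decide
  by_cases h2 : s = "mentions_social_proof"
  · rw [h2, (by decide : pvLabelDict.get? "mentions_social_proof" = some "strong opener")] at h
    injection h with h; subst h; decide
  by_cases h3 : s = "explains_value"
  · rw [h3, (by decide : pvLabelDict.get? "explains_value" = some "neutral opener")] at h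
    injection h with h; subst h; decide
  by_cases h4 : s = "neutral_delivery"
  · rw [h4, (by decide : pvLabelDict.get? "neutral_delivery" = some "weak opener")] at h
    injection h with h; subst h; decide
  by_cases h5 : s = "pushes_close"
  · rw [h5, (by decide : pvLabelDict.get? "pushes_close" = some "damaging opener")] at h
    injection h with h; subst h; decide
  by_cases h6 : s = "dismisses_concern"
  · rw [h6, (by decide : pvLabelDict.get? "dismisses_concern" = some "damaging opener")] at h
    injection h with h; subst h; decide
  exfalso
  rw [(by decide : pvLabelDict = PySem.Dict.mk
    [("builds_rapport", "strong opener"), ("mentions_social_proof", "strong opener"),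
     ("explains_value", "neutral opener"), ("neutral_delivery", "weak opener"),
     ("pushes_close", "damaging opener"), ("dismisses_concern", "damaging opener")])] at h
  simp [PySem.Dict.get?, Ne.symm h1, Ne.symm h2, Ne.symm h3, Ne.symm h4, Ne.symm h5, Ne.symm h6] at h

-- B's loop step on a label
def pvStepL (best : Option Int) (l : String) : Option Int :=
  match best with
  | none => some (pvLr l)
  | some b => if pvLr l < b then some (pvLr l) else some b

theorem pv_fold_eq (xs : List String) :
    ∀ acc : Option Int,
      xs.foldl (fun best signal =>
        match pvRankDict.get? signal with
        | none => best
        | some rank =>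
          match best with
          | none => some rank
          | some b => if rank < b then some rank else some b) acc
      = (xs.filterMap (fun signal => pvLabelDict.get? signal)).foldl pvStepL acc := by
  induction xs with
  | nil => intro acc; rfl
  | cons s xs ih =>
    intro acc
    simp only [List.foldl_cons, List.filterMap_cons]
    rw [pv_dict_agree s]
    cases h : pvLabelDict.get? s with
    | none => simp [ih]
    | some v =>
      simp only [Option.map_some, List.foldl_cons]
      rw [ih]
      cases acc <;> rfl

-- foldl of pvStepL from some b0 computes a running minimum
theorem pv_fold_some (ls : List String) : ∀ b0 : Int,
    ls.foldl pvStepL (some b0) = some (ls.foldl (fun a l => min a (pvLr l)) b0) := by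
  induction ls with
  | nil => intro b0; rfl
  | cons l ls ih =>
    intro b0
    simp only [List.foldl_cons]
    by_cases h : pvLr l < b0
    · rw [show pvStepL (some b0) l = some (pvLr l) from by simp [pvStepL, h], ih]
      rw [min_eq_right h.le]
    · rw [show pvStepL (some b0) l = some b0 from by simp [pvStepL, h], ih]
      rw [min_eq_left (not_lt.mp h)]

theorem pv_min_le (ls : List String) : ∀ b0 : Int,
    ls.foldl (fun a l => min a (pvLr l)) b0 ≤ b0 ∧
    ∀ l ∈ ls, ls.foldl (fun a l => min a (pvLr l)) b0 ≤ pvLr l := by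
  induction ls with
  | nil => intro b0; exact ⟨le_refl _, by simp⟩
  | cons x ls ih =>
    intro b0
    simp only [List.foldl_cons]
    obtain ⟨h1, h2⟩ := ih (min b0 (pvLr x))
    refine ⟨le_trans h1 (min_le_left _ _), ?_⟩
    intro l hl
    rcases List.mem_cons.mp hl with rfl | hl
    · exact le_trans h1 (min_le_right _ _)
    · exact h2 l hl

theorem pv_min_mem (ls : List String) : ∀ b0 : Int,
    ls.foldl (fun a l => min a (pvLr l)) b0 = b0 ∨
    ∃ l ∈ ls, ls.foldl (fun a l => min a (pvLr l)) b0 = pvLr l := by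
  induction ls with
  | nil => intro b0; exact Or.inl rfl
  | cons x ls ih =>
    intro b0
    simp only [List.foldl_cons]
    rcases ih (min b0 (pvLr x)) with h | ⟨l, hl, h⟩
    · rcases min_cases b0 (pvLr x) with ⟨e, _⟩ | ⟨e, _⟩
      · exact Or.inl (h.trans e)
      · exact Or.inr ⟨x, by simp, h.trans e⟩
    · exact Or.inr ⟨l, by simp [hl], h⟩

-- ===== VERDICT (by name: the statement is the Claim_ definition above) =====
theorem opening_quality_label_py_spec : Claim_equal_opening_quality_label_py := by
  intro xs _
  unfold Spec_opening_quality_label_py opening_quality_label_py opening_quality_label_py_alt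
  rw [pv_fold_eq xs none]
  have hmem0 : ∀ l ∈ xs.filterMap (fun signal => pvLabelDict.get? signal),
      l = "damaging opener" ∨ l = "weak opener" ∨ l = "strong opener" ∨ l = "neutral opener" := by
    intro l hl
    obtain ⟨s, _, hs⟩ := List.mem_filterMap.mp hl
    exact pv_label_mem s l hs
  generalize hg : xs.filterMap (fun signal => pvLabelDict.get? signal) = ls
  rw [hg] at hmem0
  clear hg
  cases ls with
  | nil => rfl
  | cons l0 ls' =>
    rw [if_neg (by simp : ¬((l0 :: ls').isEmpty = true))]
    rw [List.foldl_cons, show pvStepL none l0 = some (pvLr l0) from rfl, pv_fold_some]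
    set m := ls'.foldl (fun a l => min a (pvLr l)) (pvLr l0) with hm
    have hle := pv_min_le ls' (pvLr l0)
    have hle' : ∀ l ∈ l0 :: ls', m ≤ pvLr l := by
      intro l hl
      rcases List.mem_cons.mp hl with rfl | hl
      · exact hle.1
      · exact hle.2 l hl
    obtain ⟨lm, hlm, hmeq⟩ : ∃ l ∈ l0 :: ls', m = pvLr l := by
      rcases pv_min_mem ls' (pvLr l0) with h | ⟨l, hl, h⟩
      · exact ⟨l0, List.mem_cons_self, h⟩
      · exact ⟨l, List.mem_cons_of_mem _ hl, h⟩
    have hfour := hmem0 lm hlm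
    by_cases hD : "damaging opener" ∈ l0 :: ls'
    · have h0 : m ≤ 0 := by have := hle' _ hD; simpa [pvLr] using this
      have h0' : 0 ≤ m := by
        rw [hmeq]; rcases hfour with rfl | rfl | rfl | rfl <;> decide
      rw [if_pos (by simpa using hD), (le_antisymm h0 h0' : m = 0)]
      decide
    · rw [if_neg (by simpa using hD)]
      have hnD : ∀ l ∈ l0 :: ls', 1 ≤ pvLr l := by
        intro l hl
        have hne : l ≠ "damaging opener" := fun e => hD (e ▸ hl)
        rcases hmem0 l hl with rfl | rfl | rfl | rfl <;> first | (exact absurd rfl hne) | decide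
      by_cases hW : "weak opener" ∈ l0 :: ls'
      · have h1 : m ≤ 1 := by have := hle' _ hW; simpa [pvLr] using this
        have h1' : 1 ≤ m := by rw [hmeq]; exact hnD lm hlm
        rw [if_pos (by simpa using hW), (le_antisymm h1 h1' : m = 1)]
        decide
      · rw [if_neg (by simpa using hW)]
        have hnW : ∀ l ∈ l0 :: ls', 2 ≤ pvLr l := by
          intro l hl
          have hd : l ≠ "damaging opener" := fun e => hD (e ▸ hl)
          have hw : l ≠ "weak opener" := fun e => hW (e ▸ hl)
          rcases hmem0 l hl with rfl | rfl | rfl | rfl <;>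
            first | (exact absurd rfl hd) | (exact absurd rfl hw) | decide
        by_cases hS : "strong opener" ∈ l0 :: ls'
        · have h2 : m ≤ 2 := by have := hle' _ hS; simpa [pvLr] using this
          have h2' : 2 ≤ m := by rw [hmeq]; exact hnW lm hlm
          rw [if_pos (by simpa using hS), (le_antisymm h2 h2' : m = 2)]
          decide
        · have hm3 : m = 3 := by
            rw [hmeq]
            have hd : lm ≠ "damaging opener" := fun e => hD (e ▸ hlm)
            have hw : lm ≠ "weak opener" := fun e => hW (e ▸ hlm)
            have hs : lm ≠ "strong opener" := fun e => hS (e ▸ hlm)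
            rcases hfour with rfl | rfl | rfl | rfl <;>
              first | (exact absurd rfl hd) | (exact absurd rfl hw) | (exact absurd rfl hs) | decide
          rw [if_neg (by simpa using hS), hm3]
          decide
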